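-- pv_equiv track=rewrite | github.com/ChrisMuteb/Art-Gallery | main.py | group_paintings_in_pairs
-- ===== SOURCE A (Python) =====
-- def group_paintings_in_pairs(paintings):
--     pairs = []
--
--     left_pointer = 0
--     right_pointer = len(paintings) - 1
--
--     # Iterate until the pointers meet or cross each other.
--     while left_pointer < right_pointer:
--         pair = (paintings[left_pointer], paintings[right_pointer])
--         pairs.append(pair)
--
--         # Move the pointers towards each other.
--         left_pointer += 1
--         right_pointer -= 1
--
--     # If there's one painting left in the middle (odd number of paintings), add it as a single element pair.
--     if left_pointer == right_pointer:
--         pairs.append((paintings[left_pointer],))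
--
--     return pairs
-- ===== SOURCE B (Python) =====
-- def group_paintings_in_pairs(paintings):
--     n = len(paintings)
--     half = n // 2
--     pairs = [(a, b) for a, b in zip(paintings[:half], reversed(paintings[n - half:]))]
--     if n % 2 == 1:
--         pairs.append((paintings[half],))
--     return pairs
-- ===== Notes on version B (the rewrite author's own statement) =====
-- stated objective: idiomatic
-- what changed: Replaces the explicit two-pointer while-loop with a split-and-zip decomposition: zip the front half against the reversed back half, then append the odd middle element.
import Mathlib
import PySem

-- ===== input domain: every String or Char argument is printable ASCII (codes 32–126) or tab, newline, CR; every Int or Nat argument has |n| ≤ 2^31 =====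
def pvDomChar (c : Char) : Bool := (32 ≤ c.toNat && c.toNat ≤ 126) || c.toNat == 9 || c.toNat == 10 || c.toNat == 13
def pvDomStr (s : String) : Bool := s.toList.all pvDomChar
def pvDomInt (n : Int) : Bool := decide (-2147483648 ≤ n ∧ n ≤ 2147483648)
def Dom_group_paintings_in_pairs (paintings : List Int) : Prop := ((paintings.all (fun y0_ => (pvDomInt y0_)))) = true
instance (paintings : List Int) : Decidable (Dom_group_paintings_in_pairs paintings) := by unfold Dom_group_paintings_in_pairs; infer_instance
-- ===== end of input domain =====

-- B replaces A's two-pointer while-loop by a split-and-zip decomposition (idiomatic; same O(n) cost).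
-- Python tuples of length 1/2 are modelled as List Int.

-- ===== PORT A =====
-- the while-loop; the final 'if left == right' check of A runs when the loop exits, so it is the
-- else-branch here (same pointer values).  All indexing is in range (0 ≤ l ≤ r < len), so
-- (pyGet? …).getD 0 is exact.
def pvAGo (ps : List Int) (l r : Int) (acc : List (List Int)) : List (List Int) :=
  if l < r then
    pvAGo ps (l + 1) (r - 1)
      (acc ++ [[(PySem.List.pyGet? ps l).getD 0, (PySem.List.pyGet? ps r).getD 0]])
  else if l = r then acc ++ [[(PySem.List.pyGet? ps l).getD 0]] else acc
termination_by (r - l).toNat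
decreasing_by omega

def group_paintings_in_pairs (paintings : List Int) : List (List Int) :=
  pvAGo paintings 0 ((paintings.length : Int) - 1) []

-- ===== PORT B =====
-- paintings[:half] = take half, paintings[n-half:] = drop (n-half) (bounds are nonnegative, exact).
def group_paintings_in_pairs_alt (paintings : List Int) : List (List Int) :=
  let n := paintings.length
  let half := n / 2
  let pairs := ((paintings.take half).zip ((paintings.drop (n - half)).reverse)).map
    (fun p => [p.1, p.2])
  if n % 2 = 1 then pairs ++ [[paintings.getD half 0]] else pairs

-- ===== PRECONDITION & SPEC =====
def Spec_group_paintings_in_pairs (paintings : List Int) (out : List (List Int)) : Prop := out = group_paintings_in_pairs_alt paintings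
instance (paintings : List Int) (out : List (List Int)) : Decidable (Spec_group_paintings_in_pairs paintings out) := by unfold Spec_group_paintings_in_pairs; infer_instance

-- ===== CLAIM (what is proved, stated in full; the proofs are below) =====
def Claim_equal_group_paintings_in_pairs : Prop := ∀ (paintings : List Int), Dom_group_paintings_in_pairs paintings → Spec_group_paintings_in_pairs paintings (group_paintings_in_pairs paintings)

-- ===== LEMMAS AND PROOFS =====

-- common closed form: pairs indexed by j ∈ [i, n/2), plus the middle element when n is odd
def pvRest (ps : List Int) (i : Nat) : List (List Int) :=
  (List.range' i (ps.length / 2 - i)).map (fun j => [ps.getD j 0, ps.getD (ps.length - 1 - j) 0])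
    ++ (if ps.length % 2 = 1 then [[ps.getD (ps.length / 2) 0]] else [])

theorem pvAGo_spec (ps : List Int) (i : Nat) (acc : List (List Int)) (h : i ≤ ps.length / 2) :
    pvAGo ps (i : Int) ((ps.length : Int) - 1 - i) acc = acc ++ pvRest ps i := by
  generalize hk : ps.length / 2 - i = k
  induction k generalizing i acc with
  | zero =>
    have hi2 : ps.length / 2 = i := by omega
    rw [pvAGo]
    rcases Nat.even_or_odd ps.length with he | ho
    · obtain ⟨m, hm⟩ := he
      have h1 : ¬ ((i : Int) < (ps.length : Int) - 1 - i) := by omega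
      have h2 : ¬ ((i : Int) = (ps.length : Int) - 1 - i) := by omega
      have h3 : ps.length % 2 = 0 := by omega
      rw [if_neg h1, if_neg h2, pvRest, hk, h3]
      simp
    · obtain ⟨m, hm⟩ := ho
      have h1 : ¬ ((i : Int) < (ps.length : Int) - 1 - i) := by omega
      have h2 : (i : Int) = (ps.length : Int) - 1 - i := by omega
      have h3 : ps.length % 2 = 1 := by omega
      rw [if_neg h1, if_pos h2, pvRest, hk, h3]
      rw [PySem.List.pyGet?_natCast]
      have hlt : i < ps.length := by omega
      simp [List.getElem?_eq_getElem hlt, List.getD, hi2]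
  | succ k ih =>
    have hlt : (i : Int) < (ps.length : Int) - 1 - i := by omega
    rw [pvAGo, if_pos hlt, pvRest]
    have hcast : (ps.length : Int) - 1 - i - 1 = ((ps.length : Int) - 1 - (i + 1 : Nat)) := by
      push_cast; ring
    have hi1 : (i : Int) + 1 = ((i + 1 : Nat) : Int) := by push_cast; ring
    rw [hi1, hcast, ih (i + 1) _ (by omega) (by omega), pvRest]
    have hr : List.range' i (ps.length / 2 - i) = i :: List.range' (i + 1) k := by
      rw [hk, List.range'_succ]
    have hk1 : ps.length / 2 - (i + 1) = k := by omega
    rw [hr, hk1]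
    have hcast2 : (ps.length : Int) - 1 - i = ((ps.length - 1 - i : Nat) : Int) := by omega
    rw [hcast2, PySem.List.pyGet?_natCast, PySem.List.pyGet?_natCast]
    have hi_lt : i < ps.length := by omega
    have hj_lt : ps.length - 1 - i < ps.length := by omega
    simp [List.getElem?_eq_getElem hi_lt, List.getElem?_eq_getElem hj_lt, List.getD]

theorem pvAlt_eq_rest (ps : List Int) : group_paintings_in_pairs_alt ps = pvRest ps 0 := by
  unfold group_paintings_in_pairs_alt pvRest
  have hlen_drop : (ps.drop (ps.length - ps.length / 2)).length = ps.length / 2 := by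
    simp; omega
  have hzip : ((ps.take (ps.length / 2)).zip ((ps.drop (ps.length - ps.length / 2)).reverse)).map
      (fun p => [p.1, p.2])
      = (List.range' 0 (ps.length / 2 - 0)).map
        (fun j => [ps.getD j 0, ps.getD (ps.length - 1 - j) 0]) := by
    apply List.ext_getElem
    · simp [hlen_drop]; omega
    · intro i h1 h2
      have hi : i < ps.length / 2 := by simp [hlen_drop] at h1; omega
      have hi_len : i < ps.length := by omega
      have hidx : ps.length - 1 - i < ps.length := by omega
      simp only [List.getElem_map, List.getElem_zip, List.getElem_range',
        List.getElem_take, List.getElem_reverse, List.getElem_drop]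
      have hidx2 : ps.length - ps.length / 2 +
          ((ps.drop (ps.length - ps.length / 2)).length - 1 - i) = ps.length - 1 - i := by
        rw [hlen_drop]; omega
      have hi0 : 0 + 1 * i = i := by omega
      simp only [hidx2, hi0, List.getD, List.getElem?_eq_getElem hi_len,
        List.getElem?_eq_getElem hidx, Option.getD_some]
  simp only [hzip]
  by_cases hodd : ps.length % 2 = 1 <;> simp [hodd]

-- ===== VERDICT (by name: the statement is the Claim_ definition above) =====
theorem group_paintings_in_pairs_spec : Claim_equal_group_paintings_in_pairs := by
  intro ps _
  unfold Spec_group_paintings_in_pairs group_paintings_in_pairs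
  have h := pvAGo_spec ps 0 [] (Nat.zero_le _)
  norm_num at h
  rw [h, pvAlt_eq_rest]
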